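-- pv_equiv track=rewrite | github.com/karnwalshashwat/AI_Resume_Builder | app.py | load_role_skills
-- ===== SOURCE A (Python) =====
-- def load_role_skills(skills_db: dict, target_role: str):
--     role_key = None
--     tr = target_role.lower()
--     for k in skills_db.keys():
--         if k.lower() == tr:
--             role_key = k; break
--     if role_key is None:
--         for k in skills_db.keys():
--             if tr in k.lower() or k.lower() in tr:
--                 role_key = k; break
--     return skills_db.get(role_key, {"core": [], "nice_to_have": []}), (role_key or target_role)
-- ===== SOURCE B (Python) =====
-- def load_role_skills(skills_db: dict, target_role: str):
--     tr = target_role.lower()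
--     cands = [(i, k) for i, k in enumerate(skills_db) if tr in k.lower() or k.lower() in tr]
--     best = min(cands, key=lambda p: (0 if p[1].lower() == tr else 1, p[0]), default=None)
--     if best is None:
--         return {"core": [], "nice_to_have": []}, target_role
--     k = best[1]
--     return skills_db.get(k, {"core": [], "nice_to_have": []}), (k or target_role)
-- ===== Notes on version B (the rewrite author's own statement) =====
-- stated objective: alternative
-- what changed: Replaces A's two sequential scans with early breaks (one for an exact lowercase match, then a second full scan for a substring match) by building the list of substring-matching (index, key) candidates once and selecting min with the lexicographic key (exactness, position), exploiting that an exact match is also a substring match.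
import Mathlib
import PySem

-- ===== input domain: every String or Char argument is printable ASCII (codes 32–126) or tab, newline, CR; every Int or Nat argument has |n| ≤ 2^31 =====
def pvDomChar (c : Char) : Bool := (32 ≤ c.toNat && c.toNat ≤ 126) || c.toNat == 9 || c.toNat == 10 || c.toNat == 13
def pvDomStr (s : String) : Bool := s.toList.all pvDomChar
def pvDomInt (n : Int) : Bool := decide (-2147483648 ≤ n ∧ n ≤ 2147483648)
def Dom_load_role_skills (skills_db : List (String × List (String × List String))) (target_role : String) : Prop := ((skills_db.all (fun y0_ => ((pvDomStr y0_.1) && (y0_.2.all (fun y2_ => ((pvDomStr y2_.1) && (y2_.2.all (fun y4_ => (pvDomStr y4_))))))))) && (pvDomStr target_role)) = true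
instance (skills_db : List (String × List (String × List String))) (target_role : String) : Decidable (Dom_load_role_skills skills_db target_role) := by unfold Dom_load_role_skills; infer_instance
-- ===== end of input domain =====

-- B replaces A's two sequential key scans by building the list of substring-matching
-- (index, key) candidates once and taking min with key (exactness, position) (alternative algorithm).


-- ===== PORT A =====
-- Both ports read the assoc-list argument exactly as Python's dict(...) would:
-- PySem.Dict.ofList collapses duplicate keys (first position, last value), at both nesting levels.
def pvNormDb (skills_db : List (String × List (String × List String))) :
    PySem.Dict String (List (String × List String)) :=
  PySem.Dict.ofList (skills_db.map (fun p => (p.1, (PySem.Dict.ofList p.2).items)))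

def pvDefaultSkills : List (String × List String) := [("core", []), ("nice_to_have", [])]

-- first loop of A: first key with k.lower() == tr (break)
def pvFindExact (tr : String) : List String → Option String
  | [] => none
  | k :: ks => if PySem.Str.lower k = tr then some k else pvFindExact tr ks

-- second loop of A: first key with (tr in k.lower() or k.lower() in tr) (break)
def pvFindSub (tr : String) : List String → Option String
  | [] => none
  | k :: ks =>
      if PySem.Str.isIn tr (PySem.Str.lower k) || PySem.Str.isIn (PySem.Str.lower k) tr
      then some k else pvFindSub tr ks

def load_role_skills (skills_db : List (String × List (String × List String))) (target_role : String) : (List (String × List String)) × String :=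
  let d := pvNormDb skills_db
  let tr := PySem.Str.lower target_role
  let role_key : Option String :=
    match pvFindExact tr d.keys with
    | some k => some k
    | none => pvFindSub tr d.keys
  ((match role_key with
    | some k => d.getD k pvDefaultSkills
    | none => pvDefaultSkills),
   (match role_key with
    | some k => if k = "" then target_role else k   -- Python truthiness: role_key or target_role
    | none => target_role))

-- ===== PORT B =====
-- the comprehension of Source B: substring-matching (index, key) pairs
def pvCands (tr : String) (ks : List String) (s : Int) : List (Int × String) :=
  (PySem.List.enumerate ks s).filter
    (fun p => PySem.Str.isIn tr (PySem.Str.lower p.2) || PySem.Str.isIn (PySem.Str.lower p.2) tr)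

def load_role_skills_alt (skills_db : List (String × List (String × List String))) (target_role : String) : (List (String × List String)) × String :=
  let d := pvNormDb skills_db
  let tr := PySem.Str.lower target_role
  let cands := pvCands tr d.keys 0
  match PySem.List.min2? cands
      (fun p => if PySem.Str.lower p.2 = tr then (0 : Int) else 1) (fun p => p.1) with
  | none => ([("core", []), ("nice_to_have", [])], target_role)
  | some best => (d.getD best.2 [("core", []), ("nice_to_have", [])],
                  if best.2 = "" then target_role else best.2)

-- ===== PRECONDITION & SPEC =====
def Spec_load_role_skills (skills_db : List (String × List (String × List String))) (target_role : String) (out : (List (String × List String)) × String) : Prop := out = load_role_skills_alt skills_db target_role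
instance (skills_db : List (String × List (String × List String))) (target_role : String) (out : (List (String × List String)) × String) : Decidable (Spec_load_role_skills skills_db target_role out) := by unfold Spec_load_role_skills; infer_instance

-- ===== CLAIM (what is proved, stated in full; the proofs are below) =====
def Claim_equal_load_role_skills : Prop := ∀ (skills_db : List (String × List (String × List String))) (target_role : String), Dom_load_role_skills skills_db target_role → Spec_load_role_skills skills_db target_role (load_role_skills skills_db target_role)

-- ===== LEMMAS AND PROOFS =====

-- the per-element step of PySem.List.min2? with B's two keys
def pvK1 (tr : String) (p : Int × String) : Int := if PySem.Str.lower p.2 = tr then 0 else 1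

def pvStep (tr : String) (acc : Option (Int × String)) (x : Int × String) : Option (Int × String) :=
  match acc with
  | none => some x
  | some m => if decide (pvK1 tr x < pvK1 tr m) || (!decide (pvK1 tr m < pvK1 tr x) && decide (x.1 < m.1))
              then some x else some m

lemma min2_eq_fold (tr : String) (l : List (Int × String)) :
    PySem.List.min2? l (fun p => if PySem.Str.lower p.2 = tr then (0 : Int) else 1) (fun p => p.1)
      = l.foldl (pvStep tr) none := by
  unfold PySem.List.min2?
  congr 1
  funext acc x
  cases acc <;> simp [pvStep, pvK1]

lemma isIn_self (s : String) : PySem.Str.isIn s s = true :=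
  (PySem.Str.isIn_iff_infix s s).mpr (List.infix_refl _)

lemma subTest_of_exact {tr k : String} (he : PySem.Str.lower k = tr) :
    (PySem.Str.isIn tr (PySem.Str.lower k) || PySem.Str.isIn (PySem.Str.lower k) tr) = true := by
  rw [he, isIn_self]
  simp

lemma fold_exact (tr : String) (l : List (Int × String)) (i : Int) (m : String)
    (hm : PySem.Str.lower m = tr) (hl : ∀ p ∈ l, i < p.1) :
    l.foldl (pvStep tr) (some (i, m)) = some (i, m) := by
  induction l with
  | nil => rfl
  | cons x t ih =>
    have hx : i < x.1 := hl x (by simp)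
    have hstep : pvStep tr (some (i, m)) x = some (i, m) := by
      by_cases he : PySem.Str.lower x.2 = tr <;>
        simp [pvStep, pvK1, hm, he] <;> omega
    simp only [List.foldl_cons, hstep]
    exact ih (fun p hp => hl p (by simp [hp]))

lemma fold_sub (tr : String) (l : List (Int × String)) (i : Int) (m : String)
    (hm : ¬ PySem.Str.lower m = tr) (hl : ∀ p ∈ l, i < p.1)
    (hp : l.Pairwise (fun p q => p.1 < q.1)) :
    l.foldl (pvStep tr) (some (i, m)) =
      match l.find? (fun p => PySem.Str.lower p.2 == tr) with
      | some e => some e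
      | none => some (i, m) := by
  induction l with
  | nil => rfl
  | cons x t ih =>
    have hxi : i < x.1 := hl x (by simp)
    by_cases he : PySem.Str.lower x.2 = tr
    · have hbeq : (PySem.Str.lower x.2 == tr) = true := by simp [he]
      have hstep : pvStep tr (some (i, m)) x = some x := by
        simp [pvStep, pvK1, hm, he]
      simp only [List.foldl_cons, hstep]
      rw [fold_exact tr t x.1 x.2 he (fun p hp' => (List.pairwise_cons.mp hp).1 p hp')]
      simp [List.find?, hbeq]
    · have hbeq : (PySem.Str.lower x.2 == tr) = false := by simp [he]
      have hstep : pvStep tr (some (i, m)) x = some (i, m) := by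
        simp [pvStep, pvK1, hm, he]; omega
      simp only [List.foldl_cons, hstep]
      rw [ih (fun p hp' => hl p (by simp [hp'])) (List.pairwise_cons.mp hp).2]
      simp [List.find?, hbeq]

lemma mem_cands_fst (tr : String) (ks : List String) (s : Int) :
    ∀ p ∈ pvCands tr ks s, s ≤ p.1 := by
  intro p hp
  have hmem := List.mem_of_mem_filter hp
  obtain ⟨k, _, rfl⟩ := (PySem.List.mem_enumerate_iff _ _ _).mp hmem
  omega

lemma pairwise_cands (tr : String) (ks : List String) (s : Int) :
    (pvCands tr ks s).Pairwise (fun p q => p.1 < q.1) :=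
  (PySem.List.pairwise_lt_enumerate ks s).filter _

lemma cands_cons (tr k : String) (ks : List String) (s : Int) :
    pvCands tr (k :: ks) s =
      if PySem.Str.isIn tr (PySem.Str.lower k) || PySem.Str.isIn (PySem.Str.lower k) tr
      then (s, k) :: pvCands tr ks (s + 1) else pvCands tr ks (s + 1) := by
  simp only [pvCands, PySem.List.enumerate_cons, List.filter_cons]

lemma find_exact_cands (tr : String) (ks : List String) (s : Int) :
    ((pvCands tr ks s).find? (fun p => PySem.Str.lower p.2 == tr)).map (·.2)
      = pvFindExact tr ks := by
  induction ks generalizing s with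
  | nil => rfl
  | cons k ks ih =>
    rw [cands_cons]
    by_cases he : PySem.Str.lower k = tr
    · have hP := subTest_of_exact he
      have hbeq : (PySem.Str.lower k == tr) = true := by simp [he]
      rw [if_pos hP]
      simp only [List.find?, hbeq, pvFindExact, if_pos he, Option.map_some]

    · have hbeq : (PySem.Str.lower k == tr) = false := by simp [he]
      by_cases hP : (PySem.Str.isIn tr (PySem.Str.lower k) || PySem.Str.isIn (PySem.Str.lower k) tr) = true
      · rw [if_pos hP]
        simp only [List.find?, hbeq]
        rw [ih]
        simp [pvFindExact, he]
      · rw [if_neg hP]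
        rw [ih]
        simp [pvFindExact, he]

lemma key_eq (tr : String) (ks : List String) (s : Int) :
    ((pvCands tr ks s).foldl (pvStep tr) none).map (·.2) =
      (match pvFindExact tr ks with
       | some k => some k
       | none => pvFindSub tr ks) := by
  induction ks generalizing s with
  | nil => rfl
  | cons k ks ih =>
    rw [cands_cons]
    by_cases he : PySem.Str.lower k = tr
    · have hP := subTest_of_exact he
      rw [if_pos hP]
      simp only [List.foldl_cons]
      have h0 : pvStep tr none (s, k) = some (s, k) := rfl
      rw [h0, fold_exact tr _ s k he
        (fun p hp => lt_of_lt_of_le (by omega) (mem_cands_fst tr ks (s + 1) p hp))]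
      simp [pvFindExact, he]
    · by_cases hP : (PySem.Str.isIn tr (PySem.Str.lower k) || PySem.Str.isIn (PySem.Str.lower k) tr) = true
      · rw [if_pos hP]
        simp only [List.foldl_cons]
        have h0 : pvStep tr none (s, k) = some (s, k) := rfl
        rw [h0, fold_sub tr _ s k he
          (fun p hp => lt_of_lt_of_le (by omega) (mem_cands_fst tr ks (s + 1) p hp))
          (pairwise_cands tr ks (s + 1))]
        have hfe := find_exact_cands tr ks (s + 1)
        cases hf : (pvCands tr ks (s + 1)).find? (fun p => PySem.Str.lower p.2 == tr) with
        | some e =>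
          rw [hf] at hfe
          simp only [Option.map_some] at hfe
          simp only [pvFindExact, if_neg he, ← hfe, Option.map_some]
        | none =>
          rw [hf] at hfe
          simp only [Option.map_none] at hfe
          simp only [pvFindExact, if_neg he, ← hfe, pvFindSub, if_pos hP, Option.map_some]
      · rw [if_neg hP]
        rw [ih]
        simp only [pvFindExact, if_neg he, pvFindSub, if_neg hP]

-- ===== VERDICT (by name: the statement is the Claim_ definition above) =====
theorem load_role_skills_spec : Claim_equal_load_role_skills := by
  intro skills_db target_role _
  unfold Spec_load_role_skills load_role_skills load_role_skills_alt
  simp only [min2_eq_fold]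
  have h := key_eq (PySem.Str.lower target_role) (pvNormDb skills_db).keys 0
  cases hf : (pvCands (PySem.Str.lower target_role) (pvNormDb skills_db).keys 0).foldl
      (pvStep (PySem.Str.lower target_role)) none with
  | none =>
    rw [hf] at h
    simp only [Option.map_none] at h
    simp [← h, pvDefaultSkills]
  | some best =>
    rw [hf] at h
    simp only [Option.map_some] at h
    simp [← h, pvDefaultSkills]
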